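-- pv_equiv track=rewrite | github.com/sschlingmann04/Advent-of-Code | 2016/day09.py | decompressText_v1
-- ===== SOURCE A (Python) =====
-- def handleMarker(txt: str, pos: int):
--     # Find the first character after the end of the marker, represented by ")"
--     current_pos = pos
--     pos = txt.find(")", pos) + 1
--     marker = txt[current_pos + 1:pos - 1]  # Slice to get the full marker string (excluding the parentheses)
--
--     # Return the number of characters and number of times they should be repeated, along with the index of the character immediately following the marker
--     num_chars, num_repeats = [int(x) for x in marker.split("x")]
--     return num_chars, num_repeats, pos
--
-- def decompressText_v1(txt: str):
--     decompressed_txt = []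
--     i = 0  # Manual index counter
--
--     while i < len(txt):
--         # The "normal" case: just add the character itself to the list
--         if txt[i] != "(":
--             decompressed_txt.append(txt[i])
--             i += 1
--         # If the next character is a "(", then it is the start of a marker
--         else:
--             num_chars, num_repeats, i = handleMarker(txt, i)
--
--             # Take the next x amount of characters and repeat them y times according to the marker; add this string to the list
--             current_pos = i
--             i += num_chars
--             decompressed_txt.append(txt[current_pos:i] * num_repeats)
--
--     return len("".join(decompressed_txt))
-- ===== SOURCE B (Python) =====
-- def decompressText_v1(txt: str):
--     # Single pass over the input accumulating the decompressed LENGTH arithmetically,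
--     # never materializing the expanded text.
--     total = 0
--     i = 0
--     n = len(txt)
--     while i < n:
--         if txt[i] == "(":
--             close = txt.index(")", i)
--             a, b = txt[i + 1:close].split("x")
--             num_chars, num_repeats = int(a), int(b)
--             data_start = close + 1
--             total += num_repeats * min(num_chars, n - data_start)
--             i = data_start + num_chars
--         else:
--             total += 1
--             i += 1
--     return total
-- ===== Notes on version B (the rewrite author's own statement) =====
-- stated objective: faster
-- what changed: A builds the whole decompressed text as a list of string pieces, joins and measures it (cost proportional to the decompressed length); B makes one pass over the input accumulating the decompressed length arithmetically, adding repeats times the clamped data length per marker, without materializing anything.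
-- outside the precondition, e.g. on decompressText_v1('(2x3Q'): A returns 9, B raises ValueError; on decompressText_v1('(-1x2)ab'): A returns 3, B returns 1; on decompressText_v1('(3x1)(ju'): A returns 3, B returns 3
import Mathlib
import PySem

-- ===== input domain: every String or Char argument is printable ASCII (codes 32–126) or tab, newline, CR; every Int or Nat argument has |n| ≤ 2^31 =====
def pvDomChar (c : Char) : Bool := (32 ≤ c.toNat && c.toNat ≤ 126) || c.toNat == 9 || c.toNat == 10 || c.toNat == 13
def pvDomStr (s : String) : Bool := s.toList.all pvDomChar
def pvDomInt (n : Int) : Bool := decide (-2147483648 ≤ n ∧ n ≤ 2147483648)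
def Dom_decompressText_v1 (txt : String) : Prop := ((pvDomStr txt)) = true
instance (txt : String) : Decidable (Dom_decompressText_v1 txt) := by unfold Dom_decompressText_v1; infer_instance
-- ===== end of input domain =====

-- B replaces A's materialization of the decompressed text (list of pieces, join, len) by a
-- single pass that accumulates the decompressed length arithmetically; return values only.

-- ===== PORT A =====
-- port of handleMarker; none = the ValueError Python raises when the marker does not
-- split into exactly two int()-parsable fields
def handleMarker (txt : List Char) (pos : Int) : Option (Int × Int × Int) :=
  let current_pos := pos
  let pos' := PySem.Chars.findFrom txt [')'] pos none + 1
  let marker := PySem.Chars.slice txt (some (current_pos + 1)) (some (pos' - 1))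
  match PySem.Chars.split? marker ['x'] with
  | some [a, b] =>
    match PySem.Int.ofChars? a, PySem.Int.ofChars? b with
    | some num_chars, some num_repeats => some (num_chars, num_repeats, pos')
    | _, _ => none
  | _ => none

-- A's while-loop; fuel only makes the recursion structural (each admitted iteration moves i
-- forward, so length+1 fuel is never exhausted on inputs satisfying Pre_); none = raise/ran out
def loopA (cs : List Char) : Nat → List (List Char) → Int → Option (List (List Char))
  | 0, _, _ => none
  | fuel+1, decompressed_txt, i =>
    if i < PySem.List.len cs then
      match PySem.Chars.pyGet? cs i with
      | none => none
      | some c =>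
        if c ≠ '(' then loopA cs fuel (decompressed_txt ++ [[c]]) (i + 1)
        else
          match handleMarker cs i with
          | none => none
          | some (num_chars, num_repeats, i') =>
            let current_pos := i'
            let i'' := i' + num_chars
            loopA cs fuel
              (decompressed_txt ++
                [PySem.List.pyRepeat (PySem.Chars.slice cs (some current_pos) (some i'')) num_repeats])
              i''
    else some decompressed_txt

def decompressText_v1 (txt : String) : Int :=
  match loopA txt.toList (txt.toList.length + 1) [] 0 with
  | some decompressed_txt => PySem.List.len (PySem.Chars.join [] decompressed_txt)
  | none => 0   -- Python raised (or diverges); unreachable under Pre_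

-- ===== PORT B =====
-- B's while-loop: an Int accumulator instead of A's list of string pieces
def loopB (cs : List Char) : Nat → Int → Int → Option Int
  | 0, _, _ => none
  | fuel+1, total, i =>
    if i < PySem.List.len cs then
      match PySem.Chars.pyGet? cs i with
      | none => none
      | some c =>
        if c = '(' then
          let close := PySem.Chars.findFrom cs [')'] i none
          if close = -1 then none   -- txt.index raises ValueError
          else
            match PySem.Chars.split? (PySem.Chars.slice cs (some (i + 1)) (some close)) ['x'] with
            | some [a, b] =>
              match PySem.Int.ofChars? a, PySem.Int.ofChars? b with
              | some num_chars, some num_repeats =>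
                let data_start := close + 1
                loopB cs fuel
                  (total + num_repeats * min num_chars (PySem.List.len cs - data_start))
                  (data_start + num_chars)
              | _, _ => none
            | _ => none
        else loopB cs fuel (total + 1) (i + 1)
    else some total

def decompressText_v1_alt (txt : String) : Int :=
  match loopB txt.toList (txt.toList.length + 1) 0 0 with
  | some total => total
  | none => 0   -- unreachable under Pre_

-- ===== PRECONDITION & SPEC =====
-- d parses with Python's int() to a nonnegative value
def parsesNonneg (d : List Char) : Bool := (PySem.Int.ofChars? d).any fun v => decide (0 ≤ v)

-- at position i (holding '(') the first following ')' closes a marker "(AxB)" whose two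
-- fields parse with int() to nonnegative values
def markerOK (cs : List Char) (i : Nat) : Bool :=
  (List.range cs.length).any fun k =>
    decide (i < k) && (cs[k]? == some ')') &&
    ((List.range k).all fun m => decide (m ≤ i) || !(cs[m]? == some ')')) &&
    (match PySem.Chars.split? ((cs.drop (i + 1)).take (k - (i + 1))) ['x'] with
     | some [d1, d2] => parsesNonneg d1 && parsesNonneg d2
     | _ => false)

-- Pre_ excludes inputs in which some opening parenthesis does not begin a well-formed
-- marker of two nonnegative int()-parsable fields: on such inputs A usually raises
-- ValueError (or never terminates); the remaining excluded corners are unspecified ones on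
-- which no behaviour is canonical — an unterminated marker still parsable through find()'s
-- -1 result (there B raises ValueError) and negative marker fields (there A's and B's
-- values are equally defensible) — and Pre_ conservatively requires well-formedness even of
-- opening parentheses inside skipped data regions, which a reader cannot identify without
-- running the scan (there A and B agree).
def Pre_decompressText_v1 (txt : String) : Prop :=
  ∀ i, i < txt.toList.length → txt.toList[i]? = some '(' → markerOK txt.toList i = true
instance (txt : String) : Decidable (Pre_decompressText_v1 txt) := by
  unfold Pre_decompressText_v1; infer_instance

def pvWitness_decompressText_v1 : String := "A(3x2)XY(10x3)BCD"

def Spec_decompressText_v1 (txt : String) (out : Int) : Prop := out = decompressText_v1_alt txt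
instance (txt : String) (out : Int) : Decidable (Spec_decompressText_v1 txt out) := by
  unfold Spec_decompressText_v1; infer_instance

-- ===== CLAIM (what is proved, stated in full; the proofs are below) =====
def Claim_equal_decompressText_v1 : Prop :=
  ∀ (txt : String), Dom_decompressText_v1 txt → Pre_decompressText_v1 txt →
    Spec_decompressText_v1 txt (decompressText_v1 txt)

-- ===== LEMMAS AND PROOFS =====
theorem prefix_singleton (c : Char) (t : List Char) : ([c] <+: t) ↔ t.head? = some c := by
  cases t <;> simp [List.prefix_cons_iff, eq_comm]

theorem find_first (s : List Char) (c : Char) (m : Nat) (hm : s[m]? = some c)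
    (hmin : ∀ m' < m, s[m']? ≠ some c) : PySem.Chars.find s [c] = (m : Int) := by
  have hml : m < s.length := by
    by_contra h
    rw [List.getElem?_eq_none (by omega)] at hm; simp at hm
  have hpre : [c] <+: s.drop m := by
    rw [prefix_singleton, List.head?_drop, hm]
  have hinf : [c] <:+: s := hpre.isInfix.trans (List.drop_suffix m s).isInfix
  have hnn : 0 ≤ PySem.Chars.find s [c] := (PySem.Chars.find_nonneg_iff s [c]).mpr hinf
  obtain ⟨hat, hminf⟩ := PySem.Chars.find_spec hnn
  have hle : ¬ (PySem.Chars.find s [c]).toNat < m := by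
    intro hlt
    have := (prefix_singleton c _).mp hat
    rw [List.head?_drop] at this
    exact hmin _ hlt this
  have hge : ¬ m < (PySem.Chars.find s [c]).toNat := fun hlt => hminf m hlt hpre
  omega

theorem findFrom_first (cs : List Char) (i k : Nat) (hik : i < k) (hk : k < cs.length)
    (hi : cs[i]? ≠ some ')') (hkc : cs[k]? = some ')')
    (hbet : ∀ m, i < m → m < k → cs[m]? ≠ some ')') :
    PySem.Chars.findFrom cs [')'] (i : Int) none = (k : Int) := by
  rw [PySem.Chars.findFrom_natCast cs [')'] i (by omega)]
  have hfind : PySem.Chars.find (cs.drop i) [')'] = ((k - i : Nat) : Int) := by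
    apply find_first
    · rw [List.getElem?_drop]; rw [Nat.add_sub_cancel' (by omega)]; exact hkc
    · intro m' hm'
      rw [List.getElem?_drop]
      rcases Nat.eq_zero_or_pos m' with h0 | h0
      · subst h0; simpa using hi
      · exact hbet (i + m') (by omega) (by omega)
  rw [hfind]
  have hne : ((k - i : Nat) : Int) ≠ -1 := by omega
  rw [if_neg hne]
  omega

theorem parsesNonneg_spec (d : List Char) (h : parsesNonneg d = true) :
    ∃ v : Int, PySem.Int.ofChars? d = some v ∧ 0 ≤ v := by
  unfold parsesNonneg at h
  cases hd : PySem.Int.ofChars? d <;> simp [hd] at h ⊢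
  exact h

theorem markerOK_spec (cs : List Char) (i : Nat) (_hi : i < cs.length)
    (hc : cs[i]? = some '(') (h : markerOK cs i = true) :
    ∃ (k : Nat) (d1 d2 : List Char) (nc nr : Int),
      i < k ∧ k < cs.length ∧
      PySem.Chars.findFrom cs [')'] (i : Int) none = (k : Int) ∧
      PySem.Chars.split? (PySem.Chars.slice cs (some ((i : Int) + 1)) (some (k : Int))) ['x']
        = some [d1, d2] ∧
      PySem.Int.ofChars? d1 = some nc ∧ 0 ≤ nc ∧
      PySem.Int.ofChars? d2 = some nr ∧ 0 ≤ nr := by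
  unfold markerOK at h
  rw [List.any_eq_true] at h
  obtain ⟨k, hkmem, hk⟩ := h
  rw [List.mem_range] at hkmem
  simp only [Bool.and_eq_true, decide_eq_true_eq, beq_iff_eq, List.all_eq_true] at hk
  obtain ⟨⟨⟨hik, hkc⟩, hbet⟩, hmatch⟩ := hk
  refine ⟨k, ?_⟩
  have hbet' : ∀ m, i < m → m < k → cs[m]? ≠ some ')' := by
    intro m h1 h2 hc'
    have := hbet m (List.mem_range.mpr h2)
    simp [hc'] at this; omega
  have hff := findFrom_first cs i k hik hkmem (by simp [hc]) hkc hbet'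
  have hslice : PySem.Chars.slice cs (some ((i : Int) + 1)) (some (k : Int))
      = (cs.drop (i + 1)).take (k - (i + 1)) := by
    have hcast : ((i : Int) + 1) = ((i + 1 : Nat) : Int) := by push_cast; ring
    rw [hcast, PySem.Chars.slice_eq_listSlice, PySem.List.slice_natCast]
  rw [hslice] at *
  revert hmatch
  cases hsp : PySem.Chars.split? ((cs.drop (i + 1)).take (k - (i + 1))) ['x'] with
  | none => simp
  | some parts =>
    match parts with
    | [] => simp
    | [_] => simp
    | d1 :: d2 :: d3 :: _ => simp
    | [d1, d2] =>
      intro hb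
      rw [Bool.and_eq_true] at hb
      obtain ⟨v1, hv1, hv1n⟩ := parsesNonneg_spec d1 hb.1
      obtain ⟨v2, hv2, hv2n⟩ := parsesNonneg_spec d2 hb.2
      exact ⟨d1, d2, v1, v2, hik, hkmem, hff, rfl, hv1, hv1n, hv2, hv2n⟩

theorem join_nil_flatten (l : List (List Char)) : PySem.Chars.join [] l = l.flatten := by
  simp [PySem.Chars.join, List.intercalate]
  induction l with
  | nil => rfl
  | cons h t ih => cases t <;> simp_all [List.intersperse]

theorem piece_len (cs : List Char) (p nc nr : Int) (hp : 0 ≤ p) (hpl : p ≤ (cs.length : Int))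
    (hnc : 0 ≤ nc) (hnr : 0 ≤ nr) :
    ((PySem.List.pyRepeat (PySem.Chars.slice cs (some p) (some (p + nc))) nr).length : Int)
      = nr * min nc ((cs.length : Int) - p) := by
  rw [PySem.Chars.slice_eq_listSlice]
  rw [PySem.List.slice_toNat _ hp (by omega)]
  simp only [PySem.List.pyRepeat]
  simp [List.length_flatten, Nat.cast_mul]
  rw [max_eq_left hnr]
  congr 1
  omega

theorem lockstep (cs : List Char)
    (hpre : ∀ i, i < cs.length → cs[i]? = some '(' → markerOK cs i = true) :
    ∀ (fuel : Nat) (i : Int), 0 ≤ i → ∀ (acc : List (List Char)) (total : Int),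
      loopB cs fuel total i
        = (loopA cs fuel acc i).map
            (fun r => total + ((r.flatten.length : Int) - (acc.flatten.length : Int))) := by
  intro fuel
  induction fuel with
  | zero => intros; rfl
  | succ n ih =>
    intro i hi acc total
    rw [loopA, loopB]
    by_cases hlt : i < PySem.List.len cs
    · rw [if_pos hlt, if_pos hlt]
      have hil : i.toNat < cs.length := by
        rw [PySem.List.len_eq] at hlt; omega
      have hget : PySem.Chars.pyGet? cs i = some cs[i.toNat] := by
        rw [PySem.Chars.pyGet?_eq_listPyGet?]
        exact PySem.List.pyGet?_eq_some_getElem cs hi (by rwa [PySem.List.len_eq] at hlt)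
      simp only [hget]
      by_cases hpar : cs[i.toNat] = '('
      · have hAif : ¬ (cs[i.toNat] ≠ '(') := by simp [hpar]
        rw [if_neg hAif, if_pos hpar]
        have hcget : cs[i.toNat]? = some '(' := by
          rw [List.getElem?_eq_getElem hil, hpar]
        obtain ⟨k, d1, d2, nc, nr, hik, hk, hff, hsp, h1, hnc, h2, hnr⟩ :=
          markerOK_spec cs i.toNat hil hcget (hpre i.toNat hil hcget)
        have hieq : i = (i.toNat : Int) := (Int.toNat_of_nonneg hi).symm
        rw [hieq]
        have hkne : ¬ ((k : Int) = -1) := by omega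
        have hA : handleMarker cs (i.toNat : Int) = some (nc, nr, (k : Int) + 1) := by
          simp only [handleMarker, hff]
          have hb : ((k : Int) + 1 - 1) = (k : Int) := by ring
          simp only [hb, hsp, h1, h2]
        simp only [hA, hff, if_neg hkne, hsp, h1, h2]
        rw [ih ((k : Int) + 1 + nc) (by omega) _ _]
        cases loopA cs n (acc ++ [PySem.List.pyRepeat
            (PySem.Chars.slice cs (some ((k : Int) + 1)) (some ((k : Int) + 1 + nc))) nr])
            ((k : Int) + 1 + nc) with
        | none => rfl
        | some r =>
          simp only [Option.map_some, Option.some.injEq, PySem.List.len_eq,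
            List.flatten_append, List.flatten_cons, List.flatten_nil, List.append_nil,
            List.length_append]
          rw [← piece_len cs ((k : Int) + 1) nc nr (by omega) (by omega) hnc hnr]
          push_cast
          omega
      · rw [if_pos hpar, if_neg hpar]
        rw [ih (i + 1) (by omega) (acc ++ [[cs[i.toNat]]]) (total + 1)]
        cases loopA cs n (acc ++ [[cs[i.toNat]]]) (i + 1) with
        | none => rfl
        | some r =>
          simp only [Option.map_some, Option.some.injEq]
          simp only [List.flatten_append, List.length_append, List.flatten_cons,
            List.flatten_nil, List.append_nil, List.length_cons, List.length_nil]
          push_cast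
          omega
    · rw [if_neg hlt, if_neg hlt]
      simp

-- ===== VERDICT (by name: the statement is the Claim_ definition above) =====
theorem decompressText_v1_spec : Claim_equal_decompressText_v1 := by
  intro txt _ hpre
  unfold Spec_decompressText_v1 decompressText_v1 decompressText_v1_alt
  have h := lockstep txt.toList hpre (txt.toList.length + 1) 0 le_rfl [] 0
  cases hA : loopA txt.toList (txt.toList.length + 1) [] 0 with
  | none => rw [hA, Option.map_none] at h; rw [h]
  | some r =>
    rw [hA, Option.map_some] at h; rw [h]
    simp [join_nil_flatten, PySem.List.len_eq]
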